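-- pv_equiv track=rewrite | github.com/AngadDograDesri/Email-Reminders-Render | email_followup_graph_multi_user_v2.py | extract_new_content_from_email
-- ===== SOURCE A (Python) =====
-- def extract_new_content_from_email(body: str) -> str:
--     """
--     Extract only the NEW content from an email, excluding quoted replies.
--     This helps avoid detecting keywords from old quoted messages.
--     """
--     if not body:
--         return ""
--
--     # Common patterns that indicate the start of quoted content
--     quote_markers = [
--         "From:",  # Outlook-style quote
--         "-----Original Message-----",
--         "On ",  # Gmail-style "On <date>, <person> wrote:"
--         "> ",  # Traditional quote marker
--         "wrote:",
--         "Sent from",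
--         "________________________________",  # Outlook separator
--         "-----Forwarded message-----",
--     ]
--
--     lines = body.split('\n')
--     new_content_lines = []
--
--     for line in lines:
--         # Check if this line starts quoted content
--         is_quote_start = False
--         for marker in quote_markers:
--             if marker.lower() in line.lower():
--                 is_quote_start = True
--                 break
--
--         if is_quote_start:
--             # Stop collecting - rest is quoted content
--             break
--
--         new_content_lines.append(line)
--
--     return '\n'.join(new_content_lines)
-- ===== SOURCE B (Python) =====
-- import re
--
-- _QUOTE_MARKERS = [
--     "From:",
--     "-----Original Message-----",
--     "On ",
--     "> ",
--     "wrote:",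
--     "Sent from",
--     "________________________________",
--     "-----Forwarded message-----",
-- ]
-- _QUOTE_RE = re.compile("|".join(re.escape(m) for m in _QUOTE_MARKERS), re.IGNORECASE)
--
--
-- def extract_new_content_from_email(body: str) -> str:
--     """Extract only the NEW content from an email, excluding quoted replies."""
--     m = _QUOTE_RE.search(body)
--     if m is None:
--         return body
--     nl = body.rfind('\n', 0, m.start())
--     if nl == -1:
--         return ""
--     return body[:nl]
-- ===== Notes on version B (the rewrite author's own statement) =====
-- stated objective: idiomatic
-- what changed: A splits the body into lines and scans them one by one, testing all 8 quote markers per line with an accumulate-and-break loop; B does a single case-insensitive combined-pattern (regex alternation) search over the whole body, then cuts at the last newline before the leftmost marker occurrence with rfind and a slice.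
import Mathlib
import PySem

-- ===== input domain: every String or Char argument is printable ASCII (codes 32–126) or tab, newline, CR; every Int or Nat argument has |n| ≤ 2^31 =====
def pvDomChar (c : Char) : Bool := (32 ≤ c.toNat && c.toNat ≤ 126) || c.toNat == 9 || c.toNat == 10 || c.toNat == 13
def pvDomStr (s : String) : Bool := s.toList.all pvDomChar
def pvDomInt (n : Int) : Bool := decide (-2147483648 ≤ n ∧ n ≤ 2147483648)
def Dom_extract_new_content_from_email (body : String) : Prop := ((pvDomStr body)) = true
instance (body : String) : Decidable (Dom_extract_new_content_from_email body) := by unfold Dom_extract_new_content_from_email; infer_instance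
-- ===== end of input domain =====

-- B replaces A's per-line accumulate-and-break loop (8 substring tests per line) by one
-- combined leftmost-marker search over the whole body plus a backwards newline scan and a slice
-- (the re-alternation approach); equivalence of the two strategies is proved below.

-- ===== PORT A =====
-- quote_markers (shared by both ports, as in the Python sources)
def pvQuoteMarkers : List String :=
  ["From:", "-----Original Message-----", "On ", "> ", "wrote:",
   "Sent from", "________________________________", "-----Forwarded message-----"]

-- A's line loop: append each line to the accumulator until a line contains a marker
-- (case-insensitively: 'marker.lower() in line.lower()'), then stop.
def pvCollectLines : List (List Char) → List (List Char) → List (List Char)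
  | [], acc => acc
  | line :: rest, acc =>
    if pvQuoteMarkers.any (fun m =>
        PySem.Chars.isIn (PySem.Chars.lower m.toList) (PySem.Chars.lower line)) then
      acc
    else
      pvCollectLines rest (acc ++ [line])

def extract_new_content_from_email (body : String) : String :=
  if body = "" then ""
  else
    let lines := PySem.Chars.splitOn body.toList ['\n']
    String.ofList (PySem.Chars.join ['\n'] (pvCollectLines lines []))

-- ===== PORT B =====
-- re.search of the IGNORECASE alternation of the 8 markers: the leftmost start of an
-- occurrence of any marker, modelled (exactly, on this ASCII pattern) by lowering both
-- sides and taking the minimum of the per-marker first-occurrence positions.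
def pvQuoteSearch (lb : List Char) : Option Int :=
  PySem.List.min?
    (pvQuoteMarkers.filterMap (fun m =>
      let i := PySem.Chars.find lb (PySem.Chars.lower m.toList)
      if i = -1 then none else some i))
    (fun i => i)

def extract_new_content_from_email_alt (body : String) : String :=
  match pvQuoteSearch (PySem.Chars.lower body.toList) with
  | none => body
  | some i =>
    let nl := PySem.Chars.rfindFrom body.toList ['\n'] 0 (some i)  -- body.rfind('\n', 0, m.start())
    if nl = -1 then ""
    else String.ofList (PySem.Chars.slice body.toList none (some nl))  -- body[:nl]

-- ===== PRECONDITION & SPEC =====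
def Spec_extract_new_content_from_email (body : String) (out : String) : Prop := out = extract_new_content_from_email_alt body
instance (body : String) (out : String) : Decidable (Spec_extract_new_content_from_email body out) := by unfold Spec_extract_new_content_from_email; infer_instance

-- ===== CLAIM (what is proved, stated in full; the proofs are below) =====
def Claim_equal_extract_new_content_from_email : Prop := ∀ (body : String), Dom_extract_new_content_from_email body → Spec_extract_new_content_from_email body (extract_new_content_from_email body)

-- ===== LEMMAS AND PROOFS =====

-- The line predicate of A: does this line contain some marker, case-insensitively?
def pvHasM (l : List Char) : Bool :=
  pvQuoteMarkers.any (fun m =>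
    PySem.Chars.isIn (PySem.Chars.lower m.toList) (PySem.Chars.lower l))

-- structural model of body.split('\n')
def pvSplitC : List Char → List (List Char)
  | [] => [[]]
  | c :: rest => if c = '\n' then [] :: pvSplitC rest else (pvSplitC rest).modifyHead (c :: ·)

-- some (lowered) marker starts at position j of the lowered text
def pvOcc (cs : List Char) (j : Nat) : Prop :=
  ∃ m ∈ pvQuoteMarkers,
    (PySem.Chars.lower m.toList) <+: ((PySem.Chars.lower cs).drop j)

-- list-level bodies of the two ports
def pvA (cs : List Char) : List Char :=
  PySem.Chars.join ['\n'] ((pvSplitC cs).takeWhile (fun l => !pvHasM l))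

def pvB (cs : List Char) : List Char :=
  match pvQuoteSearch (PySem.Chars.lower cs) with
  | none => cs
  | some i =>
    let nl := PySem.Chars.rfindFrom cs ['\n'] 0 (some i)
    if nl = -1 then [] else PySem.Chars.slice cs none (some nl)

lemma pvSplitC_ne_nil (cs : List Char) : pvSplitC cs ≠ [] := by
  induction cs with
  | nil => simp [pvSplitC]
  | cons c rest ih =>
    simp only [pvSplitC]
    split
    · simp
    · cases h : pvSplitC rest with
      | nil => exact absurd h ih
      | cons a t => simp

lemma pvSplitOn_go_eq (cs : List Char) : ∀ (fuel : Nat) (cur : List Char) (acc : List (List Char)),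
    cs.length < fuel →
    PySem.Chars.splitOn.go ['\n'] fuel cs cur acc
      = acc.reverse ++ (pvSplitC cs).modifyHead (cur.reverse ++ ·) := by
  induction cs with
  | nil =>
    intro fuel cur acc hf
    match fuel, hf with
    | fuel+1, _ => simp [PySem.Chars.splitOn.go, pvSplitC]
  | cons c rest ih =>
    intro fuel cur acc hf
    match fuel, hf with
    | fuel+1, hf =>
      rw [PySem.Chars.splitOn.go]
      by_cases hc : c = '\n'
      · subst hc
        simp only [List.isPrefixOf, BEq.rfl, Bool.true_and, if_pos]
        have : List.drop ['\n'].length ('\n' :: rest) = rest := by simp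
        rw [this, ih _ _ _ (by simpa using Nat.lt_of_succ_lt_succ hf)]
        simp only [pvSplitC, List.reverse_cons, List.append_assoc,
          List.singleton_append]
        cases h : pvSplitC rest with
        | nil => exact absurd h (pvSplitC_ne_nil rest)
        | cons a t => simp
      · have hpre : List.isPrefixOf ['\n'] (c :: rest) = false := by
          simp [List.isPrefixOf]; exact fun h => absurd h.symm hc
        rw [hpre]
        simp only [Bool.false_eq_true, if_false]
        rw [ih _ _ _ (by simpa using Nat.lt_of_succ_lt_succ hf)]
        simp only [pvSplitC, if_neg hc]
        cases h : pvSplitC rest with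
        | nil => exact absurd h (pvSplitC_ne_nil rest)
        | cons a t => simp

lemma pvSplitOn_eq (cs : List Char) : PySem.Chars.splitOn cs ['\n'] = pvSplitC cs := by
  rw [PySem.Chars.splitOn, pvSplitOn_go_eq cs (cs.length + 1) [] [] (Nat.lt_succ_self _)]
  cases h : pvSplitC cs with
  | nil => exact absurd h (pvSplitC_ne_nil cs)
  | cons a t => simp

lemma pvSplitC_no_nl {cs : List Char} (h : '\n' ∉ cs) : pvSplitC cs = [cs] := by
  induction cs with
  | nil => rfl
  | cons c rest ih =>
    simp only [List.mem_cons, not_or] at h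
    simp [pvSplitC, Ne.symm h.1, ih h.2]

lemma pvSplitC_append {l0 : List Char} (rest : List Char) (h : '\n' ∉ l0) :
    pvSplitC (l0 ++ '\n' :: rest) = l0 :: pvSplitC rest := by
  induction l0 with
  | nil => simp [pvSplitC]
  | cons c t ih =>
    simp only [List.mem_cons, not_or] at h
    simp [pvSplitC, Ne.symm h.1, ih h.2]

lemma pvCollect_eq (ls : List (List Char)) : ∀ acc, pvCollectLines ls acc = acc ++ ls.takeWhile (fun l => !pvHasM l) := by
  induction ls with
  | nil => simp [pvCollectLines]
  | cons l rest ih =>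
    intro acc
    show (if pvHasM l then acc else pvCollectLines rest (acc ++ [l])) = _
    by_cases h : pvHasM l
    · simp [h]
    · simp only [Bool.not_eq_true] at h
      simp [h, ih]

lemma pvA_eq (body : String) : extract_new_content_from_email body = String.ofList (pvA body.toList) := by
  unfold extract_new_content_from_email
  split
  · next h => subst h; decide
  · simp [pvSplitOn_eq, pvCollect_eq, pvA]

lemma pvB_eq (body : String) : extract_new_content_from_email_alt body = String.ofList (pvB body.toList) := by
  unfold extract_new_content_from_email_alt pvB
  cases h : pvQuoteSearch (PySem.Chars.lower body.toList) with
  | none => simp [String.ofList_toList]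
  | some i =>
    simp only []
    split
    · decide
    · rfl

-- markers are nonempty and contain no newline (after lowering)
lemma pvMarkerFacts : ∀ m ∈ pvQuoteMarkers,
    PySem.Chars.lower m.toList ≠ [] ∧ '\n' ∉ PySem.Chars.lower m.toList := by
  decide

lemma pvLower_append (a b : List Char) :
    PySem.Chars.lower (a ++ b) = PySem.Chars.lower a ++ PySem.Chars.lower b := by
  simp [PySem.Chars.lower]

lemma pvLower_cons_nl (b : List Char) :
    PySem.Chars.lower ('\n' :: b) = '\n' :: PySem.Chars.lower b := by
  simp [PySem.Chars.lower]
  decide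

lemma pvLower_length (a : List Char) : (PySem.Chars.lower a).length = a.length := by
  simp [PySem.Chars.lower]

lemma pvDrop_mid (x y : List Char) (c : Char) (k : Nat) :
    (x ++ c :: y).drop (x.length + 1 + k) = y.drop k := by
  rw [List.drop_append]
  have h1 : x.length + 1 + k - x.length = k + 1 := by omega
  have h2 : List.drop (x.length + 1 + k) x = [] := by
    rw [List.drop_eq_nil_iff]; omega
  rw [h1, h2, List.drop_succ_cons, List.nil_append]

lemma pvDrop_left {x : List Char} (y : List Char) (c : Char) {j : Nat} (hj : j ≤ x.length) :
    (x ++ c :: y).drop j = x.drop j ++ c :: y := by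
  rw [List.drop_append]
  have : j - x.length = 0 := by omega
  rw [this, List.drop_zero]

lemma pvTake_mid (x y : List Char) (c : Char) (k : Nat) :
    (x ++ c :: y).take (x.length + 1 + k) = x ++ c :: y.take k := by
  rw [List.take_append]
  have h1 : x.length + 1 + k - x.length = k + 1 := by omega
  have h2 : List.take (x.length + 1 + k) x = x := List.take_of_length_le (by omega)
  rw [h1, h2, List.take_succ_cons]

lemma pvTake_left {x : List Char} (y : List Char) {j : Nat} (hj : j ≤ x.length) :
    (x ++ y).take j = x.take j := by
  rw [List.take_append]
  have : j - x.length = 0 := by omega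
  rw [this, List.take_zero, List.append_nil]

lemma pvHasM_iff (l : List Char) : pvHasM l = true ↔ ∃ j, pvOcc l j := by
  unfold pvHasM pvOcc
  rw [List.any_eq_true]
  constructor
  · rintro ⟨m, hm, hin⟩
    obtain ⟨j, hj⟩ := (PySem.Chars.exists_prefix_drop_iff_isIn _ _).2 hin
    exact ⟨j, m, hm, hj⟩
  · rintro ⟨j, m, hm, hj⟩
    exact ⟨m, hm, (PySem.Chars.exists_prefix_drop_iff_isIn _ _).1 ⟨j, hj⟩⟩

lemma pvOcc_lt_length {l : List Char} {j : Nat} (h : pvOcc l j) : j < l.length := by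
  obtain ⟨m, hm, hj⟩ := h
  have hne := (pvMarkerFacts m hm).1
  have hd : (PySem.Chars.lower l).drop j ≠ [] := by
    intro he
    rw [he, List.prefix_nil] at hj
    exact hne hj
  rw [Ne, List.drop_eq_nil_iff, pvLower_length] at hd
  omega

lemma pvSearch_eq_none (cs : List Char) :
    pvQuoteSearch (PySem.Chars.lower cs) = none ↔ ∀ j, ¬ pvOcc cs j := by
  unfold pvQuoteSearch
  rw [PySem.List.min?_eq_none_iff, List.filterMap_eq_nil_iff]
  constructor
  · intro h j hocc
    obtain ⟨m, hm, hj⟩ := hocc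
    have hin := (PySem.Chars.exists_prefix_drop_iff_isIn _ _).1 ⟨j, hj⟩
    have := h m hm
    simp only [] at this
    split at this
    · next hf =>
      rw [PySem.Chars.find_eq_neg_one_iff] at hf
      rw [PySem.Chars.isIn_iff_infix] at hin
      exact hf hin
    · exact absurd this (by simp)
  · intro h m hm
    simp only []
    split
    · rfl
    · next hf =>
      exfalso
      have hinf := (PySem.Chars.find_ne_neg_one_iff _ _).1 hf
      rw [← PySem.Chars.isIn_iff_infix, ← PySem.Chars.exists_prefix_drop_iff_isIn] at hinf
      obtain ⟨j, hj⟩ := hinf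
      exact h j ⟨m, hm, hj⟩

lemma pvSearch_eq_some {cs : List Char} {i : Int}
    (h : pvQuoteSearch (PySem.Chars.lower cs) = some i) :
    0 ≤ i ∧ i ≤ cs.length ∧ pvOcc cs i.toNat ∧ ∀ j < i.toNat, ¬ pvOcc cs j := by
  obtain ⟨m, hm, hf⟩ := List.mem_filterMap.mp (PySem.List.min?_mem h)
  have hmin := PySem.List.min?_isMin h
  simp only [] at hf
  split at hf
  · exact absurd hf (by simp)
  · next hne =>
    obtain rfl : PySem.Chars.find (PySem.Chars.lower cs) (PySem.Chars.lower m.toList) = i :=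
      Option.some_injective _ hf
    have hge : 0 ≤ PySem.Chars.find (PySem.Chars.lower cs) (PySem.Chars.lower m.toList) := by
      have := PySem.Chars.neg_one_le_find (PySem.Chars.lower cs) (PySem.Chars.lower m.toList)
      omega
    have hle := PySem.Chars.find_le_length (PySem.Chars.lower cs) (PySem.Chars.lower m.toList)
    rw [pvLower_length] at hle
    obtain ⟨hpre, hmn⟩ := PySem.Chars.find_spec hge
    refine ⟨hge, hle, ⟨m, hm, hpre⟩, ?_⟩
    intro j hj hocc
    obtain ⟨m', hm', hj'⟩ := hocc
    have hin' := (PySem.Chars.exists_prefix_drop_iff_isIn _ _).1 ⟨j, hj'⟩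
    have hge' : 0 ≤ PySem.Chars.find (PySem.Chars.lower cs) (PySem.Chars.lower m'.toList) := by
      rw [PySem.Chars.find_nonneg_iff, ← PySem.Chars.isIn_iff_infix]
      exact hin'
    have hmle : (PySem.Chars.find (PySem.Chars.lower cs) (PySem.Chars.lower m'.toList)).toNat ≤ j := by
      by_contra hlt
      exact (PySem.Chars.find_spec hge').2 j (by omega) hj'
    have hmem : PySem.Chars.find (PySem.Chars.lower cs) (PySem.Chars.lower m'.toList)
        ∈ pvQuoteMarkers.filterMap (fun m =>
          let i := PySem.Chars.find (PySem.Chars.lower cs) (PySem.Chars.lower m.toList)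
          if i = -1 then none else some i) := by
      refine List.mem_filterMap.mpr ⟨m', hm', ?_⟩
      simp only []
      rw [if_neg (by omega)]
    have := hmin _ hmem
    simp only [] at this
    omega

-- a list without the separator that is a prefix of "a ++ c :: b" is a prefix of a
lemma pvPrefix_no_sep {p a b : List Char} {c : Char}
    (hp : p <+: a ++ c :: b) (hc : c ∉ p) : p <+: a := by
  by_cases hlen : p.length ≤ a.length
  · have heq : p = (a ++ c :: b).take p.length := by
      obtain ⟨t, ht⟩ := hp
      rw [← ht, List.take_left' rfl]
    rw [pvTake_left (c :: b) hlen] at heq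
    rw [heq]
    exact List.take_prefix _ _
  · exfalso
    apply hc
    have hlt : a.length < p.length := by omega
    have := hp.getElem hlt
    have hval : (a ++ c :: b)[a.length]'(by simp) = c := by
      rw [List.getElem_append_right (le_refl a.length)]
      simp
    have hpc : p[a.length]'hlt = c := this.trans hval
    exact hpc ▸ List.getElem_mem hlt

lemma pvOcc_shift (l0 rest : List Char) (k : Nat) :
    pvOcc (l0 ++ '\n' :: rest) (l0.length + 1 + k) ↔ pvOcc rest k := by
  unfold pvOcc
  have hd : (PySem.Chars.lower (l0 ++ '\n' :: rest)).drop (l0.length + 1 + k)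
      = (PySem.Chars.lower rest).drop k := by
    rw [pvLower_append, pvLower_cons_nl, ← pvLower_length l0]
    exact pvDrop_mid _ _ _ _
  rw [hd]

lemma pvOcc_left {l0 : List Char} (rest : List Char) {j : Nat} (hj : j ≤ l0.length) :
    pvOcc (l0 ++ '\n' :: rest) j ↔ pvOcc l0 j := by
  unfold pvOcc
  have hd : (PySem.Chars.lower (l0 ++ '\n' :: rest)).drop j
      = (PySem.Chars.lower l0).drop j ++ '\n' :: PySem.Chars.lower rest := by
    rw [pvLower_append, pvLower_cons_nl]
    exact pvDrop_left _ _ (by rw [pvLower_length]; exact hj)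
  rw [hd]
  constructor
  · rintro ⟨m, hm, hpre⟩
    exact ⟨m, hm, pvPrefix_no_sep hpre (pvMarkerFacts m hm).2⟩
  · rintro ⟨m, hm, hpre⟩
    exact ⟨m, hm, hpre.trans (List.prefix_append _ _)⟩

-- rfind of a single character
lemma pvRfind_go_none {l : List Char} {c : Char} (h : ∀ k, ¬ [c] <+: l.drop k) :
    ∀ j, PySem.Chars.rfind.go l [c] j = -1 := by
  intro j
  induction j with
  | zero =>
    rw [PySem.Chars.rfind.go]
    rw [if_neg]
    rw [List.isPrefixOf_iff_prefix]
    simpa using h 0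
  | succ j ih =>
    rw [PySem.Chars.rfind.go]
    rw [if_neg, ih]
    rw [List.isPrefixOf_iff_prefix]
    exact fun hp => h (j + 1) hp

lemma pvRfind_not_mem {l : List Char} {c : Char} (h : c ∉ l) :
    PySem.Chars.rfind l [c] = -1 := by
  rw [PySem.Chars.rfind]
  apply pvRfind_go_none
  intro k hp
  exact h (List.mem_of_mem_drop (hp.mem (by simp)))

lemma pvRfind_go_last {a b : List Char} {c : Char} (h : c ∉ b) :
    ∀ j, a.length ≤ j → PySem.Chars.rfind.go (a ++ c :: b) [c] j = a.length := by
  have hpre : [c] <+: (a ++ c :: b).drop a.length := by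
    rw [List.drop_left]
    exact ⟨b, rfl⟩
  have hnot : ∀ j, a.length < j → ¬ [c] <+: (a ++ c :: b).drop j := by
    intro j hj hp
    apply h
    have hd : (a ++ c :: b).drop j = b.drop (j - a.length - 1) := by
      have hj' : j = a.length + 1 + (j - a.length - 1) := by omega
      rw [hj', pvDrop_mid]
      congr 1
      omega
    rw [hd] at hp
    exact List.mem_of_mem_drop (hp.mem (by simp))
  intro j
  induction j with
  | zero =>
    intro hij
    have ha : a.length = 0 := by omega
    have hc : List.isPrefixOf [c] (a ++ c :: b) = true := by
      rw [List.isPrefixOf_iff_prefix]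
      have h0 := hpre
      rw [ha, List.drop_zero] at h0
      exact h0
    rw [PySem.Chars.rfind.go, if_pos hc]
    omega
  | succ j ih =>
    intro hij
    rcases Nat.eq_or_lt_of_le hij with heq | hlt
    · have hc : List.isPrefixOf [c] (List.drop (j + 1) (a ++ c :: b)) = true := by
        rw [List.isPrefixOf_iff_prefix, ← heq]
        exact hpre
      rw [PySem.Chars.rfind.go, if_pos hc, heq]
    · have hc : ¬ List.isPrefixOf [c] (List.drop (j + 1) (a ++ c :: b)) = true := by
        rw [List.isPrefixOf_iff_prefix]
        exact hnot (j + 1) hlt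
      rw [PySem.Chars.rfind.go, if_neg hc, ih (by omega)]

lemma pvRfind_last {a b : List Char} {c : Char} (h : c ∉ b) :
    PySem.Chars.rfind (a ++ c :: b) [c] = a.length := by
  rw [PySem.Chars.rfind]
  exact pvRfind_go_last h _ (by simp only [List.length_append, List.length_cons]; omega)

lemma pvRfindFrom_take (cs : List Char) {i : Int} (h0 : 0 ≤ i) (hl : i ≤ cs.length) :
    PySem.Chars.rfindFrom cs ['\n'] 0 (some i) = PySem.Chars.rfind (cs.take i.toNat) ['\n'] := by
  rw [PySem.Chars.rfindFrom]
  simp only [if_neg (show ¬ ((cs.length : Int) < i) by omega),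
    if_neg (show ¬ i < (0 : Int) by omega), lt_irrefl, if_false, Int.toNat_zero, List.drop_zero]
  split
  · next hr => rw [hr]
  · omega

-- first / last occurrence decompositions
lemma pvFirstSplit {c : Char} {l : List Char} (h : c ∈ l) :
    ∃ a b, l = a ++ c :: b ∧ c ∉ a := by
  induction l with
  | nil => cases h
  | cons x t ih =>
    by_cases hx : x = c
    · exact ⟨[], t, by rw [hx]; rfl, by simp⟩
    · have ht : c ∈ t := by
        rcases List.mem_cons.mp h with h' | h'
        · exact absurd h'.symm hx
        · exact h'
      obtain ⟨a, b, heq, hna⟩ := ih ht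
      exact ⟨x :: a, b, by rw [heq]; rfl, by simp [hna]; exact fun he => hx he.symm⟩

lemma pvLastSplit {c : Char} {l : List Char} (h : c ∈ l) :
    ∃ a b, l = a ++ c :: b ∧ c ∉ b := by
  obtain ⟨a, b, heq, hna⟩ := pvFirstSplit (List.mem_reverse.mpr h)
  refine ⟨b.reverse, a.reverse, ?_, by simpa using hna⟩
  have := congrArg List.reverse heq
  rw [List.reverse_reverse] at this
  rw [this]
  simp

lemma pvB_eval {cs : List Char} {i r : Int} (hs : pvQuoteSearch (PySem.Chars.lower cs) = some i)
    (h0 : 0 ≤ i) (hl : i ≤ (cs.length : Int))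
    (hr : PySem.Chars.rfind (cs.take i.toNat) ['\n'] = r) (hge : -1 ≤ r) :
    pvB cs = if r = -1 then [] else cs.take r.toNat := by
  unfold pvB
  rw [hs]
  simp only []
  rw [pvRfindFrom_take cs h0 hl, hr]
  split
  · rfl
  · next hne =>
    rw [PySem.Chars.slice_eq_listSlice, PySem.List.slice_to cs (by omega)]

lemma pvB_none {cs : List Char} (hs : pvQuoteSearch (PySem.Chars.lower cs) = none) :
    pvB cs = cs := by
  unfold pvB
  rw [hs]

-- the head line of pvSplitC is l1 for rest = l1 ++ '\n' :: rest2
lemma pvHasM_nil : pvHasM [] = false := by decide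

-- a newline inside (l1 ++ '\n' :: rest2).take k forces l1.length < k
lemma pvFirstNL_lt {l1 rest2 : List Char} (hl1 : '\n' ∉ l1) {k : Nat}
    (h : '\n' ∈ (l1 ++ '\n' :: rest2).take k) : l1.length < k := by
  obtain ⟨n, hn, hval⟩ := List.mem_iff_getElem.mp h
  have hn' : n < k := by
    have := hn
    simp only [List.length_take] at this
    omega
  by_contra hle
  have hnl1 : n < l1.length := by
    have hlen := hn
    simp only [List.length_take, List.length_append, List.length_cons] at hlen
    omega
  apply hl1
  have : (l1 ++ '\n' :: rest2)[n]'(by simp only [List.length_append, List.length_cons]; omega) = l1[n] :=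
    List.getElem_append_left hnl1
  rw [List.getElem_take, this] at hval
  exact hval ▸ List.getElem_mem hnl1

-- conversely, if l1.length < k ≤ length then the newline is inside the take
lemma pvFirstNL_mem {l1 rest2 : List Char} {k : Nat} (hk : l1.length < k) :
    '\n' ∈ (l1 ++ '\n' :: rest2).take k := by
  rw [List.mem_iff_getElem]
  refine ⟨l1.length, ?_, ?_⟩
  · simp only [List.length_take, List.length_append, List.length_cons]
    omega
  · rw [List.getElem_take, List.getElem_append_right (le_refl _)]
    simp

lemma pvMain_noNL {cs : List Char} (h : '\n' ∉ cs) : pvA cs = pvB cs := by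
  by_cases hm : pvHasM cs
  · obtain ⟨j, hj⟩ := (pvHasM_iff cs).1 hm
    cases hs : pvQuoteSearch (PySem.Chars.lower cs) with
    | none => exact absurd hj ((pvSearch_eq_none cs).1 hs j)
    | some i =>
      obtain ⟨h0, hl, hocc, hmin⟩ := pvSearch_eq_some hs
      have hA : pvA cs = [] := by
        unfold pvA
        rw [pvSplitC_no_nl h]
        simp [hm]
      have hrf : PySem.Chars.rfind (cs.take i.toNat) ['\n'] = -1 :=
        pvRfind_not_mem (fun hmem => h (List.mem_of_mem_take hmem))
      have hB : pvB cs = [] := by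
        rw [pvB_eval hs h0 hl hrf (by omega)]
        simp
      rw [hA, hB]
  · have hs : pvQuoteSearch (PySem.Chars.lower cs) = none :=
      (pvSearch_eq_none cs).2 (fun j hj => hm ((pvHasM_iff cs).2 ⟨j, hj⟩))
    rw [pvB_none hs]
    unfold pvA
    rw [pvSplitC_no_nl h]
    simp only [List.takeWhile_cons, Bool.not_eq_eq_eq_not, Bool.not_true]
    simp [Bool.not_eq_true] at hm
    simp [hm, PySem.Chars.join_singleton]

lemma pvMain (cs : List Char) : pvA cs = pvB cs := by
  have H : ∀ n cs, cs.length ≤ n → pvA cs = pvB cs := by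
    intro n
    induction n with
    | zero =>
      intro cs hl
      have hnil : cs = [] := List.eq_nil_of_length_eq_zero (by omega)
      subst hnil
      exact pvMain_noNL (by simp)
    | succ n ih =>
      intro cs hcs
      by_cases hnl : '\n' ∈ cs
      · obtain ⟨l0, rest, rfl, hl0⟩ := pvFirstSplit hnl
        have hrest : rest.length ≤ n := by
          simp only [List.length_append, List.length_cons] at hcs
          omega
        by_cases hm0 : pvHasM l0
        · -- A stops before the first line already; B finds a marker inside l0,
          -- and no newline precedes it
          have hA : pvA (l0 ++ '\n' :: rest) = [] := by
            unfold pvA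
            rw [pvSplitC_append rest hl0]
            simp [hm0]
          obtain ⟨j, hj⟩ := (pvHasM_iff l0).1 hm0
          have hjlt : j < l0.length := pvOcc_lt_length hj
          have hocc : pvOcc (l0 ++ '\n' :: rest) j := (pvOcc_left rest (by omega)).2 hj
          cases hs : pvQuoteSearch (PySem.Chars.lower (l0 ++ '\n' :: rest)) with
          | none => exact absurd hocc ((pvSearch_eq_none _).1 hs j)
          | some i =>
            obtain ⟨h0, hl, hocci, hmin⟩ := pvSearch_eq_some hs
            have hile : i.toNat ≤ j := by
              by_contra hgt
              exact hmin j (by omega) hocc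
            have htake : (l0 ++ '\n' :: rest).take i.toNat = l0.take i.toNat :=
              pvTake_left _ (by omega)
            have hrf : PySem.Chars.rfind ((l0 ++ '\n' :: rest).take i.toNat) ['\n'] = -1 := by
              rw [htake]
              exact pvRfind_not_mem (fun hmem => hl0 (List.mem_of_mem_take hmem))
            have hB : pvB (l0 ++ '\n' :: rest) = [] := by
              rw [pvB_eval hs h0 hl hrf (by omega)]
              simp
            rw [hA, hB]
        · -- first line is clean
          cases hs : pvQuoteSearch (PySem.Chars.lower (l0 ++ '\n' :: rest)) with
          | none =>
            -- no marker anywhere: both sides return everything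
            have hno := (pvSearch_eq_none _).1 hs
            have hsrest : pvQuoteSearch (PySem.Chars.lower rest) = none :=
              (pvSearch_eq_none rest).2
                (fun j hj => hno (l0.length + 1 + j) ((pvOcc_shift l0 rest j).2 hj))
            have hArest : pvA rest = rest := by
              rw [ih rest hrest, pvB_none hsrest]
            rw [pvB_none hs]
            unfold pvA
            rw [pvSplitC_append rest hl0]
            rw [List.takeWhile_cons, if_pos (by simp [hm0])]
            cases hTW : (pvSplitC rest).takeWhile (fun l => !pvHasM l) with
            | nil =>
              exfalso
              have hAr : pvA rest = [] := by
                unfold pvA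
                rw [hTW, PySem.Chars.join_nil]
              rw [hArest] at hAr
              subst hAr
              rw [show pvSplitC [] = [[]] from rfl] at hTW
              simp [pvHasM_nil] at hTW
            | cons t1 tl =>
              rw [PySem.Chars.join_cons_cons]
              have hjr : PySem.Chars.join ['\n'] (t1 :: tl) = rest := by
                have := hArest
                unfold pvA at this
                rw [hTW] at this
                exact this
              rw [hjr]
              simp
          | some i =>
            obtain ⟨h0, hl, hocci, hmin⟩ := pvSearch_eq_some hs
            have hge : l0.length + 1 ≤ i.toNat := by
              by_contra hlt
              exact hm0 ((pvHasM_iff l0).2 ⟨i.toNat, (pvOcc_left rest (by omega)).1 hocci⟩)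
            have hksum : i.toNat = l0.length + 1 + (i.toNat - l0.length - 1) := by omega
            set k := i.toNat - l0.length - 1 with hk
            have hocck : pvOcc rest k := (pvOcc_shift l0 rest k).1 (hksum ▸ hocci)
            have hkmin : ∀ j < k, ¬ pvOcc rest j := fun j hj hocc =>
              hmin (l0.length + 1 + j) (by omega) ((pvOcc_shift l0 rest j).2 hocc)
            have hkle : k ≤ rest.length := by
              have := hl
              simp only [List.length_append, List.length_cons] at this
              omega
            cases hs' : pvQuoteSearch (PySem.Chars.lower rest) with
            | none => exact absurd hocck ((pvSearch_eq_none rest).1 hs' k)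
            | some i' =>
              obtain ⟨h0', hl', hocci', hmin'⟩ := pvSearch_eq_some hs'
              have hi'k : i'.toNat = k := by
                rcases lt_trichotomy i'.toNat k with hlt | he | hgt
                · exact absurd hocci' (hkmin _ hlt)
                · exact he
                · exact absurd hocck (hmin' _ hgt)
              have htake : (l0 ++ '\n' :: rest).take i.toNat = l0 ++ '\n' :: rest.take k := by
                rw [hksum]
                exact pvTake_mid _ _ _ _
              by_cases hnlk : '\n' ∈ rest.take k
              · -- a newline precedes the match inside rest: both recurse structurally
                obtain ⟨a, b, hab, hnb⟩ := pvLastSplit hnlk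
                have halen : a.length < k := by
                  have := congrArg List.length hab
                  simp only [List.length_take, List.length_append, List.length_cons] at this
                  omega
                have hresta : rest.take a.length = a := by
                  have h1 : (rest.take k).take a.length = a := by
                    rw [hab, pvTake_left (('\n' :: b)) (le_refl _), List.take_of_length_le (le_refl _)]
                  rw [List.take_take, Nat.min_eq_left (by omega)] at h1
                  exact h1
                have hrfk : PySem.Chars.rfind (rest.take i'.toNat) ['\n'] = (a.length : Int) := by
                  rw [hi'k, hab]
                  exact pvRfind_last hnb
                have hBrest : pvB rest = a := by
                  rw [pvB_eval hs' h0' hl' hrfk (by omega)]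
                  rw [if_neg (by omega), Int.toNat_natCast, hresta]
                have hrfcs : PySem.Chars.rfind ((l0 ++ '\n' :: rest).take i.toNat) ['\n']
                    = ((l0.length + 1 + a.length : Nat) : Int) := by
                  rw [htake, hab]
                  have hsh : l0 ++ '\n' :: (a ++ '\n' :: b) = (l0 ++ '\n' :: a) ++ '\n' :: b := by
                    simp
                  rw [hsh, pvRfind_last hnb]
                  simp only [List.length_append, List.length_cons]
                  norm_cast
                  omega
                have hBcs : pvB (l0 ++ '\n' :: rest) = l0 ++ '\n' :: a := by
                  rw [pvB_eval hs h0 hl hrfcs (by omega)]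
                  rw [if_neg (by omega), Int.toNat_natCast, pvTake_mid, hresta]
                -- A side
                have hrest_decomp : '\n' ∈ rest := List.mem_of_mem_take hnlk
                obtain ⟨l1, rest2, hrq, hl1⟩ := pvFirstSplit hrest_decomp
                have hm1 : ¬ pvHasM l1 = true := by
                  intro hm1
                  obtain ⟨j, hj⟩ := (pvHasM_iff l1).1 hm1
                  have hjlt : j < l1.length := pvOcc_lt_length hj
                  have hl1k : l1.length < k := pvFirstNL_lt hl1 (hrq ▸ hnlk)
                  exact hkmin j (by omega) (hrq ▸ (pvOcc_left rest2 (by omega)).2 hj)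
                have hAcs : pvA (l0 ++ '\n' :: rest) = l0 ++ '\n' :: pvA rest := by
                  unfold pvA
                  rw [pvSplitC_append rest hl0]
                  rw [List.takeWhile_cons, if_pos (by simp [hm0])]
                  rw [hrq, pvSplitC_append rest2 hl1]
                  rw [List.takeWhile_cons, if_pos (by simp [hm1])]
                  rw [PySem.Chars.join_cons_cons]
                  simp
                rw [hAcs, ih rest hrest, hBrest, hBcs]
              · -- no newline before the match: A keeps exactly the first line, B cuts at the separator
                have hrfcs : PySem.Chars.rfind ((l0 ++ '\n' :: rest).take i.toNat) ['\n']
                    = (l0.length : Int) := by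
                  rw [htake]
                  exact pvRfind_last hnlk
                have hBcs : pvB (l0 ++ '\n' :: rest) = l0 := by
                  rw [pvB_eval hs h0 hl hrfcs (by omega)]
                  rw [if_neg (by omega), Int.toNat_natCast, pvTake_left _ (le_refl _),
                    List.take_of_length_le (le_refl _)]
                have hAcs : pvA (l0 ++ '\n' :: rest) = l0 := by
                  unfold pvA
                  rw [pvSplitC_append rest hl0]
                  rw [List.takeWhile_cons, if_pos (by simp [hm0])]
                  by_cases hnr : '\n' ∈ rest
                  · obtain ⟨l1, rest2, hrq, hl1⟩ := pvFirstSplit hnr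
                    have hkle1 : k ≤ l1.length := by
                      by_contra hgt
                      exact hnlk (hrq ▸ pvFirstNL_mem (l1 := l1) (rest2 := rest2) (by omega))
                    have hm1 : pvHasM l1 = true := by
                      apply (pvHasM_iff l1).2
                      refine ⟨k, ?_⟩
                      have := hrq ▸ hocck
                      exact (pvOcc_left rest2 hkle1).1 this
                    rw [hrq, pvSplitC_append rest2 hl1]
                    rw [List.takeWhile_cons, if_neg (by simp [hm1])]
                    exact PySem.Chars.join_singleton _ _
                  · have hm1 : pvHasM rest = true := (pvHasM_iff rest).2 ⟨k, hocck⟩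
                    rw [pvSplitC_no_nl hnr]
                    rw [List.takeWhile_cons, if_neg (by simp [hm1])]
                    exact PySem.Chars.join_singleton _ _
                rw [hAcs, hBcs]
      · exact pvMain_noNL hnl
  exact H cs.length cs le_rfl

-- ===== VERDICT (by name: the statement is the Claim_ definition above) =====
theorem extract_new_content_from_email_spec : Claim_equal_extract_new_content_from_email := by
  intro body _
  unfold Spec_extract_new_content_from_email
  rw [pvA_eq, pvB_eq, pvMain]
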